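-- pv_equiv track=rewrite | github.com/ikaushikpal/DS-450-python | firstNaukri.py | solve
-- ===== SOURCE A (Python) =====
-- def solve(arr, n):
--     ans = 0
--     MOD = 1000000007
--     for i in range(31):
--         countSetBits = 0
--
--         for j in range(n):
--             if arr[j] & (1 << i) :
--                 countSetBits += 1
--
--         subset = (1 << countSetBits) - 1
--         subset = subset * (1 << i)
--         ans = (ans + subset) % MOD
--     return ans % MOD
-- ===== SOURCE B (Python) =====
-- def solve(arr, n):
--     MOD = 1000000007
--     # single streaming pass: consume each element's 31-bit residue bit by bit,
--     # maintaining the per-bit partial results (2^c - 1) mod MOD directly via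
--     # the recurrence t -> (2t + 1) % MOD (no counts, no shift-exponentiation pass)
--     term = [0] * 31
--     for j in range(n):
--         y = arr[j] & 0x7FFFFFFF
--         i = 0
--         while y:
--             if y & 1:
--                 term[i] = (2 * term[i] + 1) % MOD
--             y >>= 1
--             i += 1
--     ans = 0
--     for i in range(31):
--         ans = (ans + term[i] * (1 << i)) % MOD
--     return ans % MOD
-- ===== Notes on version B (the rewrite author's own statement) =====
-- stated objective: alternative
-- what changed: A makes 31 full array scans, counting set bits per position and then shift-exponentiating (1<<count)-1; B never counts at all: one streaming pass consumes each element's 31-bit residue bit by bit with a shift/test loop, maintaining the per-bit partial results (2^c-1) mod 1000000007 directly through the recurrence t -> (2t+1) % MOD, then linearly combines the table.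
import Mathlib
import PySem

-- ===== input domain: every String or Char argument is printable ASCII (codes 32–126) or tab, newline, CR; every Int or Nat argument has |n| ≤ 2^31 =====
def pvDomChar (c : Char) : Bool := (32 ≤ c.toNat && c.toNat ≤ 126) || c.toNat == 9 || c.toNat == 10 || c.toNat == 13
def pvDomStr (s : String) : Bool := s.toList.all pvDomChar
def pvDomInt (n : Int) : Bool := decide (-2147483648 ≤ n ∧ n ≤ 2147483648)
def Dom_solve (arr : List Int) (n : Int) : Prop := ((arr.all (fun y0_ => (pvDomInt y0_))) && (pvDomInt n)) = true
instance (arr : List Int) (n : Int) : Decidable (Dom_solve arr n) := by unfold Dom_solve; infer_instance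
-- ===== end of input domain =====

-- B replaces A's 31 counting scans of the array by one streaming pass that consumes each
-- element's 31-bit residue bit by bit, maintaining the per-bit partial results (2^c - 1) mod MOD
-- directly via the recurrence t -> (2t + 1) % MOD (no counts, no shift-exponentiation pass).

-- ===== PORT A =====
def solve (arr : List Int) (n : Int) : Int :=
  let MOD : Int := 1000000007
  let ans : Int :=
    (PySem.List.pyRange 0 31 1).foldl (fun ans i =>
      let countSetBits : Int :=
        (PySem.List.pyRange 0 n 1).foldl (fun c j =>
          if PySem.Int.band (PySem.List.pyGetD arr j 0) ((1 : Int) <<< i.toNat) ≠ 0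
          then c + 1 else c) 0
      let subset : Int := ((1 : Int) <<< countSetBits.toNat) - 1
      let subset : Int := subset * ((1 : Int) <<< i.toNat)
      PySem.Int.mod (ans + subset) MOD) 0
  PySem.Int.mod ans MOD

-- ===== PORT B =====
-- Python's 'while y:' inner loop; 'if 0 < y' (not 'y ≠ 0') only makes the recursion total:
-- at every call site y = x & 0x7FFFFFFF ≥ 0, where the two conditions coincide.
def pvConsume (term : List Int) (y : Int) (i : Int) : List Int :=
  if 0 < y then
    pvConsume
      (if PySem.Int.band y 1 ≠ 0
       then PySem.List.pySetD term i (PySem.Int.mod (2 * PySem.List.pyGetD term i 0 + 1) 1000000007)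
       else term)
      (y >>> (1 : Nat)) (i + 1)
  else term
termination_by y.toNat
decreasing_by
  rename_i h
  simp only [Int.shiftRight_eq_div_pow]
  omega

def solve_alt (arr : List Int) (n : Int) : Int :=
  let MOD : Int := 1000000007
  let term : List Int := List.replicate 31 0
  let term : List Int :=
    (PySem.List.pyRange 0 n 1).foldl (fun t j =>
      pvConsume t (PySem.Int.band (PySem.List.pyGetD arr j 0) 0x7FFFFFFF) 0) term
  let ans : Int :=
    (PySem.List.pyRange 0 31 1).foldl (fun ans i =>
      PySem.Int.mod (ans + PySem.List.pyGetD term i 0 * ((1 : Int) <<< i.toNat)) MOD) 0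
  PySem.Int.mod ans MOD

-- ===== PRECONDITION & SPEC =====
-- Pre_ excludes exactly the inputs where A raises IndexError: n > len(arr) (B raises there too).
def Pre_solve (arr : List Int) (n : Int) : Prop := n ≤ (arr.length : Int)
instance (arr : List Int) (n : Int) : Decidable (Pre_solve arr n) := by unfold Pre_solve; infer_instance
def pvWitness_solve : List Int × Int := ([3, 5, 9], 3)

def Spec_solve (arr : List Int) (n : Int) (out : Int) : Prop := out = solve_alt arr n
instance (arr : List Int) (n : Int) (out : Int) : Decidable (Spec_solve arr n out) := by unfold Spec_solve; infer_instance

-- ===== CLAIM (what is proved, stated in full; the proofs are below) =====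
def Claim_equal_solve : Prop := ∀ (arr : List Int) (n : Int), Dom_solve arr n → Pre_solve arr n → Spec_solve arr n (solve arr n)

-- ===== LEMMAS AND PROOFS =====

theorem pv_testBit_compl : ∀ (k n r : Nat), k < n → r < 2 ^ n →
    Nat.testBit (2 ^ n - 1 - r) k = !r.testBit k := by
  intro k
  induction k with
  | zero =>
    intro n r hk hr
    have h2 : 2 ^ 1 ≤ 2 ^ n := Nat.pow_le_pow_right (by omega) hk
    simp only [Nat.testBit_zero]
    have hdvd : 2 ^ n % 2 = 0 := by
      have : (2:Nat) ∣ 2 ^ n := dvd_pow_self 2 (by omega)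
      omega
    rcases Nat.mod_two_eq_zero_or_one r with h | h <;> simp [h] <;> omega
  | succ k ih =>
    intro n r hk hr
    obtain ⟨n', rfl⟩ : ∃ n', n = n' + 1 := ⟨n - 1, by omega⟩
    have h2 : 2 ^ (n' + 1) = 2 * 2 ^ n' := by ring
    rw [Nat.testBit_succ, Nat.testBit_succ]
    have hdiv : (2 ^ (n' + 1) - 1 - r) / 2 = 2 ^ n' - 1 - r / 2 := by omega
    rw [hdiv]
    exact ih n' (r / 2) (by omega) (by omega)

theorem pv_band_mask (x : Int) :
    PySem.Int.band x 0x7FFFFFFF =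
      (if 0 ≤ x then ((x.toNat % 2 ^ 31 : Nat) : Int)
       else ((2 ^ 31 - 1 - (-x - 1).toNat % 2 ^ 31 : Nat) : Int)) := by
  have h1 : (0x7FFFFFFF : Int).toNat = 2 ^ 31 - 1 := by decide
  unfold PySem.Int.band
  by_cases hx : 0 ≤ x
  · rw [if_pos hx, if_pos hx, if_pos (by norm_num), h1,
      Nat.and_two_pow_sub_one_eq_mod]
  · rw [if_neg hx, if_neg hx, if_pos (by norm_num), h1,
      Nat.and_comm, Nat.and_two_pow_sub_one_eq_mod]

theorem pv_band_mask_bounds (x : Int) :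
    0 ≤ PySem.Int.band x 0x7FFFFFFF ∧ (PySem.Int.band x 0x7FFFFFFF).toNat < 2 ^ 31 := by
  rw [pv_band_mask]
  split_ifs with hx
  · refine ⟨by positivity, ?_⟩
    rw [Int.toNat_natCast]
    exact Nat.mod_lt _ (by norm_num)
  · refine ⟨by positivity, ?_⟩
    rw [Int.toNat_natCast]
    have := Nat.mod_lt ((-x - 1).toNat) (show 0 < 2 ^ 31 by norm_num)
    omega

theorem pv_band_testBit (x : Int) (k : Nat) (hk : k < 31) :
    (PySem.Int.band x ((1 : Int) <<< k) ≠ 0) ↔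
      Nat.testBit (PySem.Int.band x 0x7FFFFFFF).toNat k := by
  have hsh : ((1 : Int) <<< k) = ((2 ^ k : Nat) : Int) := by
    rw [Int.shiftLeft_eq]; push_cast; ring
  have hp : (0:Nat) < 2 ^ k := by positivity
  rw [pv_band_mask]
  by_cases hx : 0 ≤ x
  · rw [if_pos hx, hsh, PySem.Int.band_of_nonneg hx (by positivity),
      Int.toNat_natCast, Int.toNat_natCast, Nat.and_two_pow,
      Nat.testBit_mod_two_pow]
    simp only [hk, decide_true, Bool.true_and]
    cases h : x.toNat.testBit k <;> simp
  · rw [if_neg hx]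
    unfold PySem.Int.band
    rw [if_neg hx, if_pos (by rw [hsh]; positivity)]
    rw [Int.toNat_natCast]
    have hkn : ((1:Int) <<< k).toNat = 2 ^ k := by rw [hsh, Int.toNat_natCast]
    rw [hkn, Nat.two_pow_and,
      pv_testBit_compl k 31 ((-x - 1).toNat % 2 ^ 31) hk (Nat.mod_lt _ (by norm_num)),
      Nat.testBit_mod_two_pow]
    simp only [hk, decide_true, Bool.true_and]
    cases h : (-x - 1).toNat.testBit k <;> simp

theorem pvConsume_spec : ∀ (f : Nat) (y : Int), y.toNat ≤ f → 0 ≤ y →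
    ∀ (term : List Int) (i : Int), 0 ≤ i → y.toNat < 2 ^ (term.length - i.toNat) →
    (pvConsume term y i).length = term.length ∧
    ∀ k : Nat, k < term.length →
      PySem.List.pyGetD (pvConsume term y i) (k : Int) 0 =
        if i ≤ (k : Int) ∧ Nat.testBit y.toNat (k - i.toNat)
        then PySem.Int.mod (2 * PySem.List.pyGetD term (k : Int) 0 + 1) 1000000007
        else PySem.List.pyGetD term (k : Int) 0 := by
  intro f
  induction f with
  | zero =>
    intro y hf hy term i hi hb
    have hy0 : y = 0 := by omega
    subst hy0
    rw [pvConsume, if_neg (by omega)]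
    exact ⟨rfl, by intro k hk; simp⟩
  | succ f ih =>
    intro y hf hy term i hi hb
    by_cases hpos : 0 < y
    · rw [pvConsume, if_pos hpos]
      have hlen1 : (if PySem.Int.band y 1 ≠ 0
          then PySem.List.pySetD term i (PySem.Int.mod (2 * PySem.List.pyGetD term i 0 + 1) 1000000007)
          else term).length = term.length := by
        split_ifs <;> simp [PySem.List.length_pySetD]
      have hytn : 1 ≤ y.toNat := by omega
      have hlt : i.toNat < term.length := by
        by_contra hc
        have : term.length - i.toNat = 0 := by omega
        rw [this] at hb
        omega
      set term' := (if PySem.Int.band y 1 ≠ 0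
          then PySem.List.pySetD term i (PySem.Int.mod (2 * PySem.List.pyGetD term i 0 + 1) 1000000007)
          else term) with hterm'
      have hdiv : y >>> (1:Nat) = y / 2 := by
        rw [Int.shiftRight_eq_div_pow]; norm_num
      have hy2 : (y >>> (1:Nat)).toNat = y.toNat / 2 := by rw [hdiv]; omega
      have hb' : (y >>> (1:Nat)).toNat < 2 ^ (term'.length - (i+1).toNat) := by
        rw [hy2, hlen1]
        have h1 : term.length - i.toNat = (term.length - (i+1).toNat) + 1 := by omega
        rw [h1] at hb
        have : 2 ^ ((term.length - (i+1).toNat) + 1) = 2 * 2 ^ (term.length - (i+1).toNat) := by ring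
        omega
      obtain ⟨ihlen, ihget⟩ := ih (y >>> (1:Nat)) (by omega) (by rw [hdiv]; omega)
        term' (i+1) (by omega) hb'
      refine ⟨by rw [ihlen, hlen1], ?_⟩
      intro k hk
      rw [ihget k (by rw [hlen1]; exact hk)]
      have hieq : i = ((i.toNat : Nat) : Int) := (Int.toNat_of_nonneg hi).symm
      have hget' : PySem.List.pyGetD term' (k:Int) 0 =
          if (k:Int) = i ∧ PySem.Int.band y 1 ≠ 0
          then PySem.Int.mod (2 * PySem.List.pyGetD term (k:Int) 0 + 1) 1000000007
          else PySem.List.pyGetD term (k:Int) 0 := by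
        rw [hterm']
        by_cases hq : PySem.Int.band y 1 ≠ 0
        · rw [if_pos hq, hieq,
            PySem.List.pyGetD_pySetD_natCast term i.toNat k _ _ hlt]
          by_cases hik : k = i.toNat
          · rw [if_pos hik, if_pos ⟨by rw [hik, ← hieq], hq⟩, hik, ← hieq]
          · rw [if_neg hik, if_neg (by rw [← hieq]; exact fun hc => hik (by omega))]
        · rw [if_neg hq, if_neg (fun hc => hq hc.2)]
      rw [hget']
      have hbit0 : (PySem.Int.band y 1 ≠ 0) ↔ Nat.testBit y.toNat 0 := by
        rw [PySem.Int.band_one, Nat.testBit_zero]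
        rw [PySem.Int.mod_eq_emod_of_pos (by omega)]
        simp only [ne_eq, decide_eq_true_eq]
        omega
      rcases lt_trichotomy (k:Int) i with hki | hki | hki
      · rw [if_neg (by omega), if_neg (by omega), if_neg (fun hc => by omega)]
      · have hkk : k = i.toNat := by omega
        rw [if_neg (by omega)]
        by_cases hb0 : PySem.Int.band y 1 ≠ 0
        · rw [if_pos ⟨hki, hb0⟩, if_pos ⟨by omega, by
            rw [hkk]; simpa using hbit0.mp hb0⟩]
        · rw [if_neg (fun hc => hb0 hc.2), if_neg (fun hc => by
            apply hb0; apply hbit0.mpr; rw [hkk] at hc; simpa using hc.2)]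
      · have hne : ¬((k:Int) = i ∧ PySem.Int.band y 1 ≠ 0) := fun hc => by omega
        rw [if_neg hne]
        have hsub : k - (i+1).toNat = (k - i.toNat) - 1 := by omega
        have hsub1 : (k - i.toNat - 1) + 1 = k - i.toNat := by omega
        have hbit : Nat.testBit (y >>> (1:Nat)).toNat (k - (i+1).toNat)
            = Nat.testBit y.toNat (k - i.toNat) := by
          rw [hsub, hy2, ← Nat.testBit_succ]; congr 1
        by_cases hc : Nat.testBit y.toNat (k - i.toNat)
        · rw [if_pos ⟨by omega, by rw [hbit]; exact hc⟩, if_pos ⟨by omega, hc⟩]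
        · rw [if_neg (fun h => hc (by rw [← hbit]; exact h.2)),
            if_neg (fun h => hc h.2)]
    · rw [pvConsume, if_neg hpos]
      have hy0 : y = 0 := by omega
      subst hy0
      exact ⟨rfl, by intro k hk; simp⟩

-- mod by the (positive) modulus is idempotent
theorem pv_mod_idem (x : Int) :
    PySem.Int.mod (PySem.Int.mod x 1000000007) 1000000007 = PySem.Int.mod x 1000000007 := by
  rw [PySem.Int.mod_eq_emod_of_pos (by norm_num), PySem.Int.mod_eq_emod_of_pos (by norm_num)]
  exact Int.emod_emod_of_dvd x dvd_rfl

-- congruence: replacing x by anything with the same residue inside c*(x+1)-1 keeps the residue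
theorem pv_mod_congr (c x y : Int)
    (h : PySem.Int.mod x 1000000007 = PySem.Int.mod y 1000000007) :
    PySem.Int.mod (c * (x + 1) - 1) 1000000007
      = PySem.Int.mod (c * (y + 1) - 1) 1000000007 := by
  have h' : Int.ModEq 1000000007 x y := by
    rw [PySem.Int.mod_eq_emod_of_pos (by norm_num),
      PySem.Int.mod_eq_emod_of_pos (by norm_num)] at h
    exact h
  have h2 := Int.ModEq.sub_right 1 (Int.ModEq.mul_left c (Int.ModEq.add_right 1 h'))
  rw [PySem.Int.mod_eq_emod_of_pos (by norm_num), PySem.Int.mod_eq_emod_of_pos (by norm_num)]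
  exact h2

-- congruence: a reduced factor may be unreduced inside an outer mod
theorem pv_mod_mul_add (a x p : Int) :
    PySem.Int.mod (a + PySem.Int.mod x 1000000007 * p) 1000000007
      = PySem.Int.mod (a + x * p) 1000000007 := by
  simp only [PySem.Int.mod_eq_emod_of_pos (show (0:Int) < 1000000007 by norm_num)]
  have h' : Int.ModEq 1000000007 (x % 1000000007) x := Int.emod_emod_of_dvd x dvd_rfl
  exact Int.ModEq.add_left a (Int.ModEq.mul_right p h')

-- B's element pass: entry k of the (always mod-reduced) table holds
-- (2^(count of elements with bit k set) * (t0[k] + 1) - 1) mod 1000000007.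
theorem pv_fold_term (arr : List Int) (js : List Int) : ∀ t : List Int, t.length = 31 →
    (∀ k : Nat, k < 31 →
      PySem.Int.mod (PySem.List.pyGetD t (k : Int) 0) 1000000007 = PySem.List.pyGetD t (k : Int) 0) →
    ((js.foldl (fun t j =>
        pvConsume t (PySem.Int.band (PySem.List.pyGetD arr j 0) 0x7FFFFFFF) 0) t).length = 31) ∧
    ∀ k : Nat, k < 31 →
      PySem.List.pyGetD (js.foldl (fun t j =>
          pvConsume t (PySem.Int.band (PySem.List.pyGetD arr j 0) 0x7FFFFFFF) 0) t) (k : Int) 0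
        = PySem.Int.mod
            (2 ^ (js.countP (fun j => decide
              (PySem.Int.band (PySem.List.pyGetD arr j 0) ((1 : Int) <<< k) ≠ 0)))
              * (PySem.List.pyGetD t (k : Int) 0 + 1) - 1) 1000000007 := by
  induction js with
  | nil =>
    intro t ht hred
    refine ⟨ht, ?_⟩
    intro k hk
    simp only [List.foldl_nil, List.countP_nil, pow_zero, one_mul, add_sub_cancel_right]
    exact (hred k hk).symm
  | cons j rest ih =>
    intro t ht hred
    set y := PySem.Int.band (PySem.List.pyGetD arr j 0) 0x7FFFFFFF with hy
    obtain ⟨hy0, hylt⟩ := pv_band_mask_bounds (PySem.List.pyGetD arr j 0)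
    obtain ⟨hclen, hcget⟩ := pvConsume_spec y.toNat y le_rfl hy0 t 0 le_rfl
      (by simpa [ht] using hylt)
    have hred' : ∀ k : Nat, k < 31 →
        PySem.Int.mod (PySem.List.pyGetD (pvConsume t y 0) (k : Int) 0) 1000000007
          = PySem.List.pyGetD (pvConsume t y 0) (k : Int) 0 := by
      intro k hk
      have hcg := hcget k (by omega)
      simp only [Nat.sub_zero, Int.toNat_zero] at hcg
      rw [hcg]
      split_ifs
      · exact pv_mod_idem _
      · exact hred k hk
    obtain ⟨ihlen, ihget⟩ := ih (pvConsume t y 0) (by rw [hclen, ht]) hred'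
    refine ⟨by simpa using ihlen, ?_⟩
    intro k hk
    simp only [List.foldl_cons]
    rw [ihget k hk]
    have hcg := hcget k (by omega)
    simp only [Nat.sub_zero, Int.toNat_zero] at hcg
    rw [List.countP_cons, hcg]
    have hiff := pv_band_testBit (PySem.List.pyGetD arr j 0) k hk
    by_cases hq : Nat.testBit y.toNat k
    · have hp : decide (PySem.Int.band (PySem.List.pyGetD arr j 0) ((1 : Int) <<< k) ≠ 0) = true :=
        decide_eq_true (hiff.mpr hq)
      rw [if_pos ⟨by omega, hq⟩, hp]
      rw [pv_mod_congr _ _ (2 * PySem.List.pyGetD t (k : Int) 0 + 1) (pv_mod_idem _)]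
      have hexp : (if (true = true) then (1:Nat) else 0) = 1 := by simp
      rw [hexp, pow_succ]
      congr 1
      ring
    · have hp : decide (PySem.Int.band (PySem.List.pyGetD arr j 0) ((1 : Int) <<< k) ≠ 0) = false :=
        decide_eq_false (fun h => hq (hiff.mp h))
      rw [if_neg (fun hc => hq hc.2), hp]
      simp

theorem pv_shift_cast (a : Int) (m : Nat) : a <<< ((m : Int)) = a <<< m := by
  rw [Int.shiftLeft_eq_mul_pow, Int.shiftLeft_eq']

theorem solve_eq_alt (arr : List Int) (n : Int) : solve arr n = solve_alt arr n := by
  unfold solve solve_alt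
  obtain ⟨htlen, htget⟩ := pv_fold_term arr (PySem.List.pyRange 0 n 1) (List.replicate 31 0)
    (by simp)
    (by
      intro k hk
      have hrep0 : PySem.List.pyGetD (List.replicate 31 (0:Int)) ((k : Nat) : Int) 0 = 0 := by
        rw [PySem.List.pyGetD_eq_getElem _ _ (by omega) (by simpa using hk),
          List.getElem_replicate]
      rw [hrep0, PySem.Int.mod_eq_emod_of_pos (by norm_num)]
      simp)
  refine congrArg (fun a => PySem.Int.mod a 1000000007) ?_
  refine PySem.List.foldl_congr_mem _ _ _ _ ?_
  intro ans i hi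
  have hi' := PySem.List.mem_pyRange_one.mp hi
  have hieq : i = ((i.toNat : Nat) : Int) := (Int.toNat_of_nonneg hi'.1).symm
  have hk31 : i.toNat < 31 := by omega
  have hrep : PySem.List.pyGetD (List.replicate 31 (0:Int)) ((i.toNat : Nat) : Int) 0 = 0 := by
    rw [PySem.List.pyGetD_eq_getElem _ _ (by omega) (by simpa using hk31),
      List.getElem_replicate]
  have hterm := htget i.toNat hk31
  rw [hrep] at hterm
  rw [← hieq] at hterm
  have hterm' : PySem.List.pyGetD
      ((PySem.List.pyRange 0 n 1).foldl (fun t j =>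
        pvConsume t (PySem.Int.band (PySem.List.pyGetD arr j 0) 0x7FFFFFFF) 0)
        (List.replicate 31 0)) i 0
      = PySem.Int.mod (2 ^ ((PySem.List.pyRange 0 n 1).countP (fun j => decide
          (PySem.Int.band (PySem.List.pyGetD arr j 0) ((1 : Int) <<< i.toNat) ≠ 0))) - 1)
          1000000007 := by
    rw [hterm]
    congr 1
    ring
  simp only [pv_shift_cast]
  rw [PySem.List.foldl_ite_add_one
      (fun j => PySem.Int.band (PySem.List.pyGetD arr j 0) ((1 : Int) <<< i.toNat) ≠ 0)]
  simp only [hterm']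
  rw [pv_mod_mul_add]
  simp only [zero_add, Int.toNat_natCast, Int.shiftLeft_eq', one_mul]
  push_cast
  ring

-- ===== VERDICT (by name: the statement is the Claim_ definition above) =====
theorem solve_spec : Claim_equal_solve := by
  intro arr n _ _
  unfold Spec_solve
  exact solve_eq_alt arr n
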